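-- pv_equiv track=rewrite | github.com/rodrigolearns/CitationFidelitySignal | scripts/scan_all_target_papers.py | _extract_elife_id_from_doi
-- ===== SOURCE A (Python) =====
-- def _extract_elife_id_from_doi(doi: str) -> str:
--     """Extract eLife article ID from DOI."""
--     doi_lower = doi.lower()
--     if 'elife' not in doi_lower:
--         return None
--
--     parts = doi_lower.split('elife.')
--     if len(parts) < 2:
--         return None
--
--     article_id = parts[1].split('.')[0].split('/')[0]
--     article_id = ''.join(c for c in article_id if c.isdigit())
--
--     return article_id if article_id else None
-- ===== SOURCE B (Python) =====
-- def _extract_elife_id_from_doi(doi: str) -> str: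
--     """Extract eLife article ID from DOI: find the first 'elife.' marker and
--     scan forward, collecting digits until a '.' or '/' terminator."""
--     s = doi.lower()
--     i = s.find('elife.')
--     if i == -1:
--         return None
--     digits = []
--     for c in s[i + 6:]:
--         if c == '.' or c == '/':
--             break
--         if c.isdigit():
--             digits.append(c)
--     return ''.join(digits) if digits else None
-- ===== Notes on version B (the rewrite author's own statement) =====
-- stated objective: simpler
-- what changed: Replaces the membership guard plus three successive split calls (on the eLife marker, then the dot, then the slash), each of which builds a whole list of pieces, with a single find of the marker followed by one forward scan that stops at the first terminator character and collects digits along the way.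
import Mathlib
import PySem

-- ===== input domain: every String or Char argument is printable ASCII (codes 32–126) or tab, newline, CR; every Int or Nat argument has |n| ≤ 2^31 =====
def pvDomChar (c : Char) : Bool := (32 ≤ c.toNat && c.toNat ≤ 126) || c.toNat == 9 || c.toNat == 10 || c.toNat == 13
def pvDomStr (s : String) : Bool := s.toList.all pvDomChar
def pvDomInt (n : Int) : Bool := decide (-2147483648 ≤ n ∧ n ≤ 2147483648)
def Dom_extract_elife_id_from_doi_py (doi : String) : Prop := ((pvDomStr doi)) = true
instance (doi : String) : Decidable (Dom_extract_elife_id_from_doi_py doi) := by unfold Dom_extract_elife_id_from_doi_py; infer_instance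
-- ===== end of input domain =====

-- B replaces A's membership guard plus split('elife.')/split('.')/split('/') chain by one find('elife.')
-- and a single forward scan collecting digits up to the first '.' or '/' (objective: simpler; return value only).

-- ===== PORT A =====
-- literal transliteration of A: lower, 'elife' membership guard, split on 'elife.',
-- length guard, parts[1].split('.')[0].split('/')[0], digit filter, empty-string-to-None.
def extract_elife_id_from_doi_py (doi : String) : Option String :=
  let doi_lower := PySem.Chars.lower doi.toList
  if PySem.Chars.isIn "elife".toList doi_lower = false then none
  else
    let parts := PySem.Chars.splitOn doi_lower "elife.".toList
    if parts.length < 2 then none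
    else
      let seg := PySem.List.pyGetD parts 1 []
      let seg := PySem.List.pyGetD (PySem.Chars.splitOn seg ".".toList) 0 []
      let seg := PySem.List.pyGetD (PySem.Chars.splitOn seg "/".toList) 0 []
      let article_id := seg.filter PySem.Chars.isdigit
      if article_id.isEmpty then none else some (String.ofList article_id)

-- ===== PORT B =====
-- the for-loop with break of Source B: stop at '.' or '/', keep digits
def pvScanDigits : List Char → List Char
  | [] => []
  | c :: rest =>
      if c = '.' ∨ c = '/' then []
      else if PySem.Chars.isdigit c then c :: pvScanDigits rest
      else pvScanDigits rest

def extract_elife_id_from_doi_py_alt (doi : String) : Option String :=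
  let s := PySem.Chars.lower doi.toList
  let i := PySem.Chars.find s "elife.".toList
  if i = -1 then none
  else
    let digits := pvScanDigits (PySem.List.slice s (some (i + 6)) none)
    if digits.isEmpty then none else some (String.ofList digits)

-- ===== PRECONDITION & SPEC =====
def Spec_extract_elife_id_from_doi_py (doi : String) (out : Option String) : Prop := out = extract_elife_id_from_doi_py_alt doi
instance (doi : String) (out : Option String) : Decidable (Spec_extract_elife_id_from_doi_py doi out) := by unfold Spec_extract_elife_id_from_doi_py; infer_instance

-- ===== CLAIM (what is proved, stated in full; the proofs are below) =====
def Claim_equal_extract_elife_id_from_doi_py : Prop := ∀ (doi : String), Dom_extract_elife_id_from_doi_py doi → Spec_extract_elife_id_from_doi_py doi (extract_elife_id_from_doi_py doi)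

-- ===== LEMMAS AND PROOFS =====

def pvMapFirst (f : List Char → List Char) : List (List Char) → List (List Char)
  | [] => []
  | x :: xs => f x :: xs

theorem pvMapFirst_id (l : List (List Char)) : pvMapFirst (fun x => x) l = l := by
  cases l <;> simp [pvMapFirst]

theorem find_go_shift (sub : List Char) : ∀ (l : List Char) (k : Nat),
    PySem.Chars.find.go sub l k =
      if PySem.Chars.find.go sub l 0 = -1 then -1 else PySem.Chars.find.go sub l 0 + k := by
  intro l
  induction l with
  | nil =>
      intro k
      rw [PySem.Chars.find.go, PySem.Chars.find.go]
      by_cases h : sub.isEmpty <;> simp [h]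
  | cons c rest ih =>
      intro k
      rw [PySem.Chars.find.go]
      conv_rhs => rw [PySem.Chars.find.go]
      by_cases h : sub.isPrefixOf (c :: rest)
      · simp [h]
      · simp only [h]
        rw [ih (k+1), ih 1]
        have hb : (-1 : Int) ≤ PySem.Chars.find.go sub rest 0 := PySem.Chars.neg_one_le_find rest sub
        by_cases h2 : PySem.Chars.find.go sub rest 0 = -1
        · simp [h2]
        · have h3 : ¬(PySem.Chars.find.go sub rest 0 + (1 : Int) = -1) := by omega
          simp only [h2, Bool.false_eq_true, if_false, Nat.cast_one]
          rw [if_neg h3]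
          push_cast
          ring

theorem find_cons_pos {sep : List Char} {c : Char} {rest : List Char}
    (h : sep.isPrefixOf (c :: rest) = true) : PySem.Chars.find (c :: rest) sep = 0 := by
  unfold PySem.Chars.find
  rw [PySem.Chars.find.go]
  simp [h]

theorem find_cons_neg {sep : List Char} {c : Char} {rest : List Char}
    (h : sep.isPrefixOf (c :: rest) = false) :
    PySem.Chars.find (c :: rest) sep =
      if PySem.Chars.find rest sep = -1 then -1 else PySem.Chars.find rest sep + 1 := by
  unfold PySem.Chars.find
  rw [PySem.Chars.find.go]
  simp only [h, Bool.false_eq_true, if_false]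
  rw [find_go_shift sep rest 1]
  norm_num  -- placeholder name fix below

theorem find_nil_of_ne {sep : List Char} (hsep : sep ≠ []) : PySem.Chars.find [] sep = -1 := by
  unfold PySem.Chars.find
  rw [PySem.Chars.find.go]
  simp [List.isEmpty_iff, hsep]

theorem go_nil (sep cur : List Char) (acc : List (List Char)) (fuel : Nat) :
    PySem.Chars.splitOn.go sep fuel [] cur acc = acc.reverse ++ [cur.reverse] := by
  cases fuel with
  | zero => rw [PySem.Chars.splitOn.go]; simp
  | succ f => simp [PySem.Chars.splitOn.go]

theorem go_succ (sep : List Char) (c : Char) (rest cur : List Char) (acc : List (List Char)) (f : Nat) :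
    PySem.Chars.splitOn.go sep (f+1) (c :: rest) cur acc =
      if sep.isPrefixOf (c :: rest) then
        PySem.Chars.splitOn.go sep f (List.drop sep.length (c :: rest)) [] (cur.reverse :: acc)
      else PySem.Chars.splitOn.go sep f rest (c :: cur) acc := by
  rw [PySem.Chars.splitOn.go]

theorem splitOn_go_spec (sep : List Char) (hsep : sep ≠ []) :
    ∀ (n : Nat) (cs : List Char), cs.length = n → ∀ (cur : List Char) (acc : List (List Char)) (fuel : Nat), n ≤ fuel →
      PySem.Chars.splitOn.go sep fuel cs cur acc
        = acc.reverse ++ pvMapFirst (fun x => cur.reverse ++ x) (PySem.Chars.splitOn cs sep) := by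
  intro n
  induction n using Nat.strong_induction_on with
  | _ n ih =>
    intro cs hlen cur acc fuel hfuel
    match cs, hlen with
    | [], hlen =>
      have hs : PySem.Chars.splitOn [] sep = [[]] := by
        unfold PySem.Chars.splitOn
        rw [go_nil]; simp
      rw [hs, go_nil]
      simp [pvMapFirst]
    | c :: rest, hlen =>
      have hn : n = rest.length + 1 := by simpa using hlen.symm
      have hL : 1 ≤ sep.length := by
        cases sep with
        | nil => exact absurd rfl hsep
        | cons a b => simp
      cases fuel with
      | zero => omega
      | succ f =>
        have hstep : PySem.Chars.splitOn (c :: rest) sep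
            = PySem.Chars.splitOn.go sep (rest.length + 1 + 1) (c :: rest) [] [] := rfl
        rw [go_succ, hstep, go_succ]
        by_cases hp : sep.isPrefixOf (c :: rest)
        · simp only [hp, if_true]
          rw [ih ((List.drop sep.length (c :: rest)).length) (by simp only [List.length_drop, List.length_cons]; omega) _ rfl [] (cur.reverse :: acc) f (by simp only [List.length_drop, List.length_cons]; omega)]
          rw [ih ((List.drop sep.length (c :: rest)).length) (by simp only [List.length_drop, List.length_cons]; omega) _ rfl [] ([].reverse :: []) (rest.length + 1) (by simp only [List.length_drop, List.length_cons]; omega)]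
          simp [pvMapFirst]
        · simp only [hp]
          rw [ih rest.length (by omega) rest rfl (c :: cur) acc f (by omega)]
          rw [ih rest.length (by omega) rest rfl [c] [] (rest.length + 1) (by omega)]
          cases hsp : PySem.Chars.splitOn rest sep with
          | nil => simp [pvMapFirst]
          | cons x xs => simp [pvMapFirst]

theorem splitOn_cons (sep : List Char) (hsep : sep ≠ []) (c : Char) (rest : List Char) :
    PySem.Chars.splitOn (c :: rest) sep =
      if sep.isPrefixOf (c :: rest) then
        [] :: PySem.Chars.splitOn (List.drop sep.length (c :: rest)) sep
      else pvMapFirst (fun x => [c] ++ x) (PySem.Chars.splitOn rest sep) := by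
  have hstep : PySem.Chars.splitOn (c :: rest) sep
      = PySem.Chars.splitOn.go sep (rest.length + 1 + 1) (c :: rest) [] [] := rfl
  rw [hstep, go_succ]
  by_cases hp : sep.isPrefixOf (c :: rest)
  · simp only [hp, if_true]
    rw [splitOn_go_spec sep hsep _ _ rfl [] _ _ (by simp only [List.length_drop, List.length_cons]; omega)]
    simp only [List.reverse_nil, List.reverse_cons, List.nil_append]
    rw [pvMapFirst_id]
    rfl
  · simp only [hp]
    rw [splitOn_go_spec sep hsep _ rest rfl [c] [] _ (by omega)]
    simp

theorem splitOn_ne_nil (sep : List Char) (hsep : sep ≠ []) (cs : List Char) :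
    PySem.Chars.splitOn cs sep ≠ [] := by
  induction cs with
  | nil =>
      unfold PySem.Chars.splitOn
      rw [go_nil]; simp
  | cons c rest ih =>
      rw [splitOn_cons sep hsep]
      by_cases hp : sep.isPrefixOf (c :: rest)
      · simp [hp]
      · simp only [hp]
        cases hsp : PySem.Chars.splitOn rest sep with
        | nil => exact absurd hsp ih
        | cons x xs => simp [pvMapFirst]

theorem splitOn_eq (sep : List Char) (hsep : sep ≠ []) : ∀ (cs : List Char),
    PySem.Chars.splitOn cs sep =
      if PySem.Chars.find cs sep = -1 then [cs]
      else List.take (PySem.Chars.find cs sep).toNat cs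
           :: PySem.Chars.splitOn (List.drop ((PySem.Chars.find cs sep).toNat + sep.length) cs) sep := by
  intro cs
  induction cs with
  | nil =>
      rw [find_nil_of_ne hsep]
      rw [if_pos rfl]
      unfold PySem.Chars.splitOn
      rw [go_nil]; simp
  | cons c rest ih =>
      rw [splitOn_cons sep hsep]
      by_cases hp : sep.isPrefixOf (c :: rest)
      · rw [find_cons_pos hp]
        simp [hp]
      · rw [if_neg (by simp [hp]), find_cons_neg (by simp [hp])]
        by_cases h2 : PySem.Chars.find rest sep = -1
        · simp only [h2, ih, pvMapFirst]
          simp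
        · have hge : (0 : Int) ≤ PySem.Chars.find rest sep := by
            have := PySem.Chars.neg_one_le_find rest sep
            omega
          rw [if_neg h2]
          rw [if_neg (by omega)]
          rw [ih, if_neg h2]
          have ht : ((PySem.Chars.find rest sep + 1).toNat) = (PySem.Chars.find rest sep).toNat + 1 := by omega
          simp only [pvMapFirst, ht, List.take_succ_cons]
          have harith : (PySem.Chars.find rest sep).toNat + 1 + sep.length
              = ((PySem.Chars.find rest sep).toNat + sep.length) + 1 := by omega
          simp [harith]

theorem head_splitOn_single (d : Char) (cs : List Char) :
    (PySem.Chars.splitOn cs [d]).getD 0 [] = cs.takeWhile (fun c => !(c == d)) := by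
  have hsep : ([d] : List Char) ≠ [] := by simp
  induction cs with
  | nil =>
      unfold PySem.Chars.splitOn
      rw [go_nil]; simp
  | cons c rest ih =>
      rw [splitOn_cons [d] hsep]
      by_cases hp : List.isPrefixOf [d] (c :: rest)
      · have hd : d = c := by simpa [List.isPrefixOf] using hp
        subst hd
        simp
      · have hd : ¬(d = c) := by simpa [List.isPrefixOf] using hp
        simp only [hp]
        cases hsp : PySem.Chars.splitOn rest [d] with
        | nil => exact absurd hsp (splitOn_ne_nil [d] hsep rest)
        | cons x xs =>
            rw [hsp] at ih
            simp only [pvMapFirst, List.getD] at ih ⊢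
            simp [Ne.symm hd]
            simpa using ih

theorem pvScanDigits_eq (cs : List Char) :
    pvScanDigits cs
      = (cs.takeWhile (fun c => !(c == '.') && !(c == '/'))).filter PySem.Chars.isdigit := by
  induction cs with
  | nil => simp [pvScanDigits]
  | cons c rest ih =>
      by_cases h : c = '.' ∨ c = '/'
      · rcases h with h | h <;> subst h <;> simp [pvScanDigits]
      · have hc1 : ¬(c = '.') := fun hc => h (Or.inl hc)
        have hc2 : ¬(c = '/') := fun hc => h (Or.inr hc)
        rw [pvScanDigits]
        rw [if_neg h]
        have h1 : (!(c == '.') && !(c == '/')) = true := by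
          simp [hc1, hc2]
        by_cases hd : PySem.Chars.isdigit c
        · simp [hd, h1, ih]
        · simp [hd, h1, ih]

theorem filter_takeWhile_extend (S t : List Char) :
    ((S ++ ('e' :: 'l' :: 'i' :: 'f' :: 'e' :: '.' :: t)).takeWhile
        (fun c => !(c == '.') && !(c == '/'))).filter PySem.Chars.isdigit
      = (S.takeWhile (fun c => !(c == '.') && !(c == '/'))).filter PySem.Chars.isdigit := by
  rw [List.takeWhile_append]
  by_cases hall : (S.takeWhile (fun c => !(c == '.') && !(c == '/'))).length = S.length
  · rw [if_pos hall]
    have hS : S.takeWhile (fun c => !(c == '.') && !(c == '/')) = S :=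
      (List.takeWhile_prefix _).eq_of_length hall
    rw [hS]
    have htw : ((('e' :: 'l' :: 'i' :: 'f' :: 'e' :: '.' :: t)).takeWhile
        (fun c => !(c == '.') && !(c == '/'))) = ['e', 'l', 'i', 'f', 'e'] := by
      simp
    rw [htw, List.filter_append]
    simp only [List.append_right_eq_self]
    decide
  · rw [if_neg hall]

theorem takeWhile_dot_slash (S : List Char) :
    (S.takeWhile (fun c => !(c == '.'))).takeWhile (fun c => !(c == '/'))
      = S.takeWhile (fun c => !(c == '.') && !(c == '/')) := by
  induction S with
  | nil => simp
  | cons c rest ih =>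
      by_cases h1 : c = '.'
      · subst h1; simp
      · by_cases h2 : c = '/'
        · subst h2; simp
        · simp [h1, h2, ih]

theorem pv_ports_agree (doi : String) :
    extract_elife_id_from_doi_py doi = extract_elife_id_from_doi_py_alt doi := by
  have hsep : ("elife.".toList : List Char) ≠ [] := by decide
  set l := PySem.Chars.lower doi.toList with hl
  simp only [extract_elife_id_from_doi_py, extract_elife_id_from_doi_py_alt]
  by_cases hf : PySem.Chars.find l "elife.".toList = -1
  · rw [if_pos hf]
    by_cases hin : PySem.Chars.isIn "elife".toList l = false
    · rw [if_pos hin]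
    · rw [if_neg hin, splitOn_eq _ hsep l, if_pos hf]
      norm_num
  · have hge : (0 : Int) ≤ PySem.Chars.find l "elife.".toList := by
      have := PySem.Chars.neg_one_le_find l "elife.".toList
      omega
    have hinfix : ("elife.".toList : List Char) <:+: l :=
      (PySem.Chars.find_ne_neg_one_iff l "elife.".toList).mp hf
    have hin : PySem.Chars.isIn "elife".toList l = true :=
      (PySem.Chars.isIn_iff_infix _ _).mpr
        ((show ("elife".toList : List Char) <+: "elife.".toList by decide).isInfix.trans hinfix)
    rw [if_neg (by rw [hin]; simp), if_neg hf, splitOn_eq _ hsep l, if_neg hf]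
    have h6 : ("elife.".toList : List Char).length = 6 := by decide
    rw [h6]
    set j := (PySem.Chars.find l "elife.".toList).toNat with hj
    set rest' := List.drop (j + 6) l with hrest
    cases hsp : PySem.Chars.splitOn rest' "elife.".toList with
    | nil => exact absurd hsp (splitOn_ne_nil _ hsep rest')
    | cons S T =>
        rw [if_neg (by simp)]
        have hget1 : PySem.List.pyGetD (List.take j l :: S :: T) 1 ([] : List Char) = S := by
          simp [PySem.List.pyGetD]
        rw [hget1]
        have hdot : (".".toList : List Char) = ['.'] := rfl
        have hslash : ("/".toList : List Char) = ['/'] := rfl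
        rw [hdot, hslash, PySem.List.pyGetD_zero, head_splitOn_single, PySem.List.pyGetD_zero,
          head_splitOn_single, takeWhile_dot_slash]
        -- B side
        rw [PySem.List.slice_from _ (by omega : (0:Int) ≤ PySem.Chars.find l "elife.".toList + 6)]
        have htn : (PySem.Chars.find l "elife.".toList + 6).toNat = j + 6 := by omega
        rw [htn, ← hrest, pvScanDigits_eq]
        -- core: digits of S's truncation = digits of rest''s truncation
        have hcore : (S.takeWhile (fun c => !(c == '.') && !(c == '/'))).filter PySem.Chars.isdigit
            = (rest'.takeWhile (fun c => !(c == '.') && !(c == '/'))).filter PySem.Chars.isdigit := by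
          rw [splitOn_eq _ hsep rest'] at hsp
          by_cases hf2 : PySem.Chars.find rest' "elife.".toList = -1
          · rw [if_pos hf2] at hsp
            obtain ⟨rfl, -⟩ := by exact List.cons.inj hsp
            rfl
          · rw [if_neg hf2] at hsp
            obtain ⟨hS, -⟩ := List.cons.inj hsp
            have hge2 : (0 : Int) ≤ PySem.Chars.find rest' "elife.".toList := by
              have := PySem.Chars.neg_one_le_find rest' "elife.".toList
              omega
            obtain ⟨t, ht⟩ := (PySem.Chars.find_spec hge2).1
            have hsplit : rest' = S ++ ('e' :: 'l' :: 'i' :: 'f' :: 'e' :: '.' :: t) := by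
              conv_lhs => rw [← List.take_append_drop (PySem.Chars.find rest' "elife.".toList).toNat rest']
              rw [hS, ← ht]
              rfl
            rw [hsplit, filter_takeWhile_extend]
        rw [hcore]

-- ===== VERDICT (by name: the statement is the Claim_ definition above) =====
theorem extract_elife_id_from_doi_py_spec : Claim_equal_extract_elife_id_from_doi_py := by
  intro doi _
  exact pv_ports_agree doi
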